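-- pv_equiv track=rewrite | github.com/htyeh/travel-day-counter | TDC.py | create_country2rank
-- ===== SOURCE A (Python) =====
-- def create_country2rank(country2days):
--     country2rank = dict()
--     current_rank = 0
--     current_max_days = float('inf')
--     rank_diff = 0 # +1 each time parallel ranking occurs
--     sorted_c2d = sorted(country2days.items(), key=lambda x:x[1], reverse=True)
--     for country, days in sorted_c2d:
--         if days < current_max_days:
--             current_rank = current_rank+rank_diff+1
--             country2rank[country] = current_rank
--             current_max_days = days
--             rank_diff = 0
--         else:
--             country2rank[country] = current_rank
--             rank_diff += 1
--     return country2rank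
-- ===== SOURCE B (Python) =====
-- def create_country2rank(country2days):
--     # competition ranking: a country's rank is 1 + the number of countries with strictly more days
--     items = sorted(country2days.items(), key=lambda x: x[1], reverse=True)
--     day_list = [d for _, d in items]
--     return {c: 1 + sum(1 for dd in day_list if dd > d) for c, d in items}
-- ===== Notes on version B (the rewrite author's own statement) =====
-- stated objective: simpler
-- what changed: Replaces A's current_rank/current_max_days/rank_diff loop carry (with a float('inf') sentinel) by the closed form 'rank = 1 + number of countries with strictly more days', computed per item over the sorted day list.
import Mathlib
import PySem

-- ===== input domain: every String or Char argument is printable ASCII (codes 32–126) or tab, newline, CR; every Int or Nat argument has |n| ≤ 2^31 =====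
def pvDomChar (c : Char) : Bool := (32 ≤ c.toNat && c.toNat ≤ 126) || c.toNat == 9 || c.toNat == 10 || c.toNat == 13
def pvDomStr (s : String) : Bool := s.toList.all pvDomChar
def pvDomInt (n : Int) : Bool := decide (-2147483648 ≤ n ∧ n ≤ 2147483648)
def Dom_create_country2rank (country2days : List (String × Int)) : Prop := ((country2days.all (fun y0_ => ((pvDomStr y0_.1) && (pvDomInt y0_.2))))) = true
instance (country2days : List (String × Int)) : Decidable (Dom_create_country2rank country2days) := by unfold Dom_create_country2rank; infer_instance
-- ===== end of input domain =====

-- B replaces A's current_rank/current_max_days/rank_diff carry with the closed form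
-- "rank = 1 + number of countries with strictly more days" (objective: simpler).

-- ===== PORT A =====
-- loop body of A; current_max_days = none encodes the initial float('inf') sentinel
-- (days are Int here, so 'days < inf' is exactly 'm = none → true')
def pvStepA (st : PySem.Dict String Int × Int × Option Int × Int) (cd : String × Int) :
    PySem.Dict String Int × Int × Option Int × Int :=
  match st with
  | (d, r, m, k) =>
    if (match m with | none => true | some mv => decide (cd.2 < mv)) then
      (d.insert cd.1 (r + k + 1), r + k + 1, some cd.2, 0)
    else
      (d.insert cd.1 r, r, m, k + 1)

def create_country2rank (country2days : List (String × Int)) : List (String × Int) :=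
  let sorted_c2d := PySem.List.sorted country2days (fun x => x.2) true
  (sorted_c2d.foldl pvStepA (PySem.Dict.empty, 0, none, 0)).1.items

-- ===== PORT B =====
-- dict-comprehension body of B; 'sum(1 for dd in day_list if dd > d)' is List.countP
def pvStepB (day_list : List Int) (d : PySem.Dict String Int) (cd : String × Int) :
    PySem.Dict String Int :=
  d.insert cd.1 (1 + ((day_list.countP (fun dd => cd.2 < dd)) : Int))

def create_country2rank_alt (country2days : List (String × Int)) : List (String × Int) :=
  let items := PySem.List.sorted country2days (fun x => x.2) true
  let day_list := items.map (fun cd => cd.2)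
  (items.foldl (pvStepB day_list) PySem.Dict.empty).items

-- ===== PRECONDITION & SPEC =====
def Spec_create_country2rank (country2days : List (String × Int)) (out : List (String × Int)) : Prop := out = create_country2rank_alt country2days
instance (country2days : List (String × Int)) (out : List (String × Int)) : Decidable (Spec_create_country2rank country2days out) := by unfold Spec_create_country2rank; infer_instance

-- ===== CLAIM (what is proved, stated in full; the proofs are below) =====
def Claim_equal_create_country2rank : Prop := ∀ (country2days : List (String × Int)), Dom_create_country2rank country2days → Spec_create_country2rank country2days (create_country2rank country2days)

-- ===== LEMMAS AND PROOFS =====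

-- the central invariant: once the first element has been processed, A's loop state
-- (r, some mv, k) over the remaining (descending) suffix produces the same dict as
-- B's closed-form inserts, where pre is the processed prefix of the sorted list.
theorem pv_loop_eq (days : List Int) :
    ∀ (rest pre : List (String × Int)) (d : PySem.Dict String Int) (r k mv : Int),
      days = (pre ++ rest).map (fun cd => cd.2) →
      (pre ++ rest).Pairwise (fun a b => b.2 ≤ a.2) →
      (∃ x ∈ pre, x.2 = mv) →
      (∀ x ∈ pre, mv ≤ x.2) →
      r = 1 + ((pre.countP (fun x => decide (mv < x.2))) : Int) →
      r + k = pre.length →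
      (rest.foldl pvStepA (d, r, some mv, k)).1 = rest.foldl (pvStepB days) d := by
  intro rest
  induction rest with
  | nil => intro pre d r k mv _ _ _ _ _ _; rfl
  | cons hd t ih =>
    intro pre d r k mv hdays hpw hmem hge hr hrk
    obtain ⟨c, dv⟩ := hd
    obtain ⟨x, hx, hxv⟩ := hmem
    have hdvle : dv ≤ mv := by
      have := (List.pairwise_append.mp hpw).2.2 x hx (c, dv) (List.mem_cons_self ..)
      simpa [hxv] using this
    have hpre_gt : ∀ y ∈ pre, dv ≤ y.2 := fun y hy => le_trans hdvle (hge y hy)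
    have ht_le : ∀ y ∈ t, y.2 ≤ dv := by
      intro y hy
      have h2 := (List.pairwise_append.mp hpw).2.1
      exact (List.pairwise_cons.mp h2).1 y hy
    have hassoc : pre ++ (c, dv) :: t = (pre ++ [(c, dv)]) ++ t := by simp
    by_cases hlt : dv < mv
    · -- strict drop: a new rank is opened
      have hpre_sgt : ∀ y ∈ pre, dv < y.2 := fun y hy => lt_of_lt_of_le hlt (hge y hy)
      have hcnt_pre : pre.countP (fun x => decide (dv < x.2)) = pre.length :=
        List.countP_eq_length.mpr (by intro y hy; simpa using hpre_sgt y hy)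
      have hcnt_t : t.countP (fun x => decide (dv < x.2)) = 0 := by
        apply List.countP_eq_zero.mpr
        intro y hy
        simpa using not_lt.mpr (ht_le y hy)
      have hBval : 1 + ((days.countP (fun dd => decide (dv < dd))) : Int) = r + k + 1 := by
        rw [hdays]
        simp only [List.map_append, List.countP_append, List.map_cons, List.countP_cons,
          List.countP_map, Function.comp_def]
        rw [hcnt_pre, hcnt_t]
        simp only [decide_eq_true_eq, if_neg (lt_irrefl dv)]
        push_cast
        omega
      simp only [List.foldl_cons, pvStepA, hlt, decide_true, if_pos]
      rw [show pvStepB days d (c, dv) = d.insert c (r + k + 1) by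
        simp only [pvStepB]; rw [hBval]]
      rw [hassoc] at hdays hpw
      refine ih (pre ++ [(c, dv)]) _ (r + k + 1) 0 dv hdays hpw
        ⟨(c, dv), by simp, rfl⟩ ?_ ?_ (by simp; omega)
      · intro y hy
        rcases List.mem_append.mp hy with hy | hy
        · exact hpre_gt y hy
        · simp at hy; simp [hy]
      · rw [List.countP_append]
        have : ([(c, dv)].countP (fun x => decide (dv < x.2))) = 0 := by simp
        rw [hcnt_pre, this]
        omega
    · -- tie: dv = mv, shared rank
      have hdv : dv = mv := le_antisymm hdvle (not_lt.mp hlt)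
      subst hdv
      have hcnt_t : t.countP (fun x => decide (dv < x.2)) = 0 := by
        apply List.countP_eq_zero.mpr
        intro y hy
        simpa using not_lt.mpr (ht_le y hy)
      have hBval : 1 + ((days.countP (fun dd => decide (dv < dd))) : Int) = r := by
        rw [hdays]
        simp only [List.map_append, List.countP_append, List.map_cons, List.countP_cons,
          List.countP_map, Function.comp_def]
        rw [hcnt_t, hr]
        simp only [decide_eq_true_eq, if_neg (lt_irrefl dv)]
        push_cast
        ring
      simp only [List.foldl_cons, pvStepA, hlt, decide_false, if_neg, Bool.false_eq_true,
        not_false_eq_true]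
      rw [show pvStepB days d (c, dv) = d.insert c r by
        simp only [pvStepB]; rw [hBval]]
      rw [hassoc] at hdays hpw
      refine ih (pre ++ [(c, dv)]) _ r (k + 1) dv hdays hpw
        ⟨(c, dv), by simp, rfl⟩ ?_ ?_ (by simp; omega)
      · intro y hy
        rcases List.mem_append.mp hy with hy | hy
        · exact hge y hy
        · simp at hy; simp [hy]
      · rw [List.countP_append]
        have : ([(c, dv)].countP (fun x => decide (dv < x.2))) = 0 := by simp
        rw [this, hr]
        omega

-- one fold-equality statement covering the whole sorted list, including the
-- initial float('inf') step of A
theorem pv_fold_eq (s : List (String × Int))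
    (hpw : s.Pairwise (fun a b => b.2 ≤ a.2)) :
    (s.foldl pvStepA (PySem.Dict.empty, 0, none, 0)).1 =
      s.foldl (pvStepB (s.map (fun cd => cd.2))) PySem.Dict.empty := by
  match s, hpw with
  | [], _ => rfl
  | (c, dv) :: t, hpw =>
    have ht_le : ∀ y ∈ t, y.2 ≤ dv := fun y hy => (List.pairwise_cons.mp hpw).1 y hy
    have hcnt_t : t.countP (fun x => decide (dv < x.2)) = 0 := by
      apply List.countP_eq_zero.mpr
      intro y hy
      simpa using not_lt.mpr (ht_le y hy)
    have hBval : 1 + ((((c, dv) :: t).map (fun cd => cd.2)).countP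
        (fun dd => decide (dv < dd)) : Int) = 1 := by
      simp only [List.map_cons, List.countP_cons, List.countP_map, Function.comp_def]
      rw [hcnt_t]
      simp
    rw [List.foldl_cons, List.foldl_cons,
      show pvStepA (PySem.Dict.empty, 0, none, 0) (c, dv) =
        ((PySem.Dict.empty : PySem.Dict String Int).insert c 1, 1, some dv, 0) by
          simp [pvStepA],
      show pvStepB (((c, dv) :: t).map (fun cd => cd.2)) PySem.Dict.empty (c, dv) =
        (PySem.Dict.empty : PySem.Dict String Int).insert c 1 by
          simp only [pvStepB]; rw [hBval]]
    exact pv_loop_eq _ t [(c, dv)] _ 1 0 dv (by simp) (by simpa using hpw)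
      ⟨(c, dv), by simp, rfl⟩ (by intro y hy; simp at hy; simp [hy]) (by simp) (by simp)

-- ===== VERDICT (by name: the statement is the Claim_ definition above) =====
theorem create_country2rank_spec : Claim_equal_create_country2rank := by
  intro l _
  show create_country2rank l = create_country2rank_alt l
  exact congrArg PySem.Dict.items
    (pv_fold_eq _ (PySem.List.sorted_pairwise_rev l (fun x => x.2)))
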